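-- pv_equiv track=rewrite | github.com/ravish-oo/opoch-toe-arcagi | src/arcbit/emitters/lattice.py | _reconstruct_grid_from_planes
-- ===== SOURCE A (Python) =====
-- from typing import List, Dict, Tuple, Optional, TypedDict
--
-- def _reconstruct_grid_from_planes(
--     A_i: Dict[int, List[int]],
--     S_i: List[int],
--     colors_order: List[int],
--     R_out: int,
--     C_out: int
-- ) -> List[List[int]]:
--     """
--     Reconstruct integer grid from singleton planes.
--
--     For each pixel (r,c) where S_i[r] has bit c set,
--     find the unique color u where A_i[u][r] has bit c set.
--
--     Spec: WO-09 v1.6 section 0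
--     """
--     Y_i = [[0] * C_out for _ in range(R_out)]
--
--     for r in range(R_out):
--         row_scope = S_i[r] if r < len(S_i) else 0
--         if row_scope == 0:
--             continue
--
--         for c in range(C_out):
--             bit = 1 << c
--             if not (row_scope & bit):
--                 continue
--
--             # Find the unique color (singleton from WO-08)
--             u = None
--             for color in colors_order:
--                 plane = A_i.get(color)
--                 if not plane:
--                     continue
--                 row_mask = plane[r] if r < len(plane) else 0
--                 if row_mask & bit:
--                     u = color
--                     break  # WO-08 guarantees singleton
--
--             # Defensive: if no color found despite scope, leave as 0 (silent)
--             if u is not None: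
--                 Y_i[r][c] = u
--
--     return Y_i
-- ===== SOURCE B (Python) =====
-- def _reconstruct_grid_from_planes(
--     A_i,
--     S_i,
--     colors_order,
--     R_out,
--     C_out
-- ):
--     """Reconstruct integer grid from singleton planes, one bitmask pass per row.
--
--     Instead of scanning all colors for every pixel, each row claims its bits
--     per color once (new = plane_row & scope & ~assigned) and the claimed bits
--     are written to the row directly, lowest set bit first.
--     """
--     limit = (1 << C_out) - 1 if C_out > 0 else 0
--     grid = []
--     for r in range(R_out):
--         scope = S_i[r] if r < len(S_i) else 0
--         row = [0] * C_out
--         if scope != 0: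
--             assigned = 0
--             for color in colors_order:
--                 plane = A_i.get(color)
--                 if not plane:
--                     continue
--                 row_mask = plane[r] if r < len(plane) else 0
--                 new = row_mask & scope & ~assigned
--                 if new:
--                     assigned |= new
--                     m = new & limit
--                     while m:
--                         c = (m & -m).bit_length() - 1
--                         row[c] = color
--                         m &= m - 1
--         grid.append(row)
--     return grid
-- ===== Notes on version B (the rewrite author's own statement) =====
-- stated objective: faster
-- what changed: Instead of scanning all colors for every pixel (R*C*K dict lookups and shifts), B makes one bitmask pass per row: each color claims its new bits once via new = plane_row & scope & ~assigned, and the claimed bits are written directly to the row by lowest-set-bit extraction.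
import Mathlib
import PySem

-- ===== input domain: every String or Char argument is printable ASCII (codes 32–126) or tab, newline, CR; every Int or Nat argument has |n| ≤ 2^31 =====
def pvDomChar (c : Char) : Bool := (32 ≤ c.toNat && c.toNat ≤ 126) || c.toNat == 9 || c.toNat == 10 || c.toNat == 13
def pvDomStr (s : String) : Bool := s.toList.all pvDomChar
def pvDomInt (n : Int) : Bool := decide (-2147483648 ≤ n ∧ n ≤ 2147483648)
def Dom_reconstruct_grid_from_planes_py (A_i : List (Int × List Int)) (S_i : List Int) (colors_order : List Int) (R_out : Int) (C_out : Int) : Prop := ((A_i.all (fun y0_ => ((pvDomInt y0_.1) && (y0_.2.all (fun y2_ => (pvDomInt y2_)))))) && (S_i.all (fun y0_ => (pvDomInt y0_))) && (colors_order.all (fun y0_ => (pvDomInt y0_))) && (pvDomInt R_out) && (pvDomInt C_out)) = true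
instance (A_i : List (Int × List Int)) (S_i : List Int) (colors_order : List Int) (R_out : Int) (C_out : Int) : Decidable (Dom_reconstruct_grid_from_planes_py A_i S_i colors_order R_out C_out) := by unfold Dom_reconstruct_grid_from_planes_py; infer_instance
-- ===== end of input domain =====

-- ===== PORT A =====
-- B rewrites the per-pixel color scan into one bitmask pass per row; objective: faster (constant-factor/asymptotic per-row work).

-- A's inner `for color in colors_order` loop with break (dict lookup = first match on the assoc list)
def pvFindColorA (A_i : List (Int × List Int)) (r : Int) (bit : Int) : List Int → Option Int
  | [] => none
  | color :: rest =>
    match (A_i.find? (fun p => p.1 == color)).map Prod.snd with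
    | none => pvFindColorA A_i r bit rest
    | some plane =>
      if plane = [] then pvFindColorA A_i r bit rest
      else
        let row_mask : Int := if r < (plane.length : Int) then PySem.List.pyGetD plane r 0 else 0
        if PySem.Int.band row_mask bit ≠ 0 then some color
        else pvFindColorA A_i r bit rest

def reconstruct_grid_from_planes_py (A_i : List (Int × List Int)) (S_i : List Int) (colors_order : List Int) (R_out : Int) (C_out : Int) : List (List Int) :=
  (PySem.List.pyRange 0 R_out 1).map (fun r =>
    let row_scope : Int := if r < (S_i.length : Int) then PySem.List.pyGetD S_i r 0 else 0
    if row_scope = 0 then List.replicate C_out.toNat 0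
    else
      (PySem.List.pyRange 0 C_out 1).map (fun c =>
        let bit : Int := (1 : Int) <<< c.toNat
        if PySem.Int.band row_scope bit = 0 then 0
        else
          match pvFindColorA A_i r bit colors_order with
          | some u => u
          | none => 0))

-- ===== PORT B =====
-- c = (m & -m).bit_length() - 1   (index of the lowest set bit of m, m > 0)
def pvLowBitIdx (m : Int) : Nat :=
  ((PySem.Int.bitLength (PySem.Int.band m (-m)) : Int) - 1).toNat

-- `while m > 0: c = (m & -m).bit_length() - 1; row[c] = color; m &= m - 1`
def pvSetBits (row : List Int) (color : Int) (m : Int) : List Int :=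
  if h : 0 < m then
    pvSetBits ((row.set (pvLowBitIdx m) color)) color (PySem.Int.band m (m - 1))
  else row
termination_by m.toNat
decreasing_by
  rw [PySem.Int.band_of_nonneg (by omega) (by omega)]
  have h1 : m.toNat &&& (m - 1).toNat ≤ (m - 1).toNat := Nat.and_le_right
  omega

-- B's per-row `for color in colors_order` loop over (row, assigned)
def pvRowB (A_i : List (Int × List Int)) (r scope limit : Int) :
    List Int → List Int → Int → List Int
  | [], row, _ => row
  | color :: rest, row, assigned =>
    match (A_i.find? (fun p => p.1 == color)).map Prod.snd with
    | none => pvRowB A_i r scope limit rest row assigned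
    | some plane =>
      if plane = [] then pvRowB A_i r scope limit rest row assigned
      else
        let row_mask : Int := if r < (plane.length : Int) then PySem.List.pyGetD plane r 0 else 0
        let new : Int := PySem.Int.band (PySem.Int.band row_mask scope) (Int.not assigned)
        if new ≠ 0 then
          pvRowB A_i r scope limit rest
            (pvSetBits row color (PySem.Int.band new limit))
            (PySem.Int.bor assigned new)
        else pvRowB A_i r scope limit rest row assigned

def reconstruct_grid_from_planes_py_alt (A_i : List (Int × List Int)) (S_i : List Int) (colors_order : List Int) (R_out : Int) (C_out : Int) : List (List Int) :=
  let limit : Int := if 0 < C_out then ((1 : Int) <<< C_out.toNat) - 1 else 0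
  (PySem.List.pyRange 0 R_out 1).map (fun r =>
    let scope : Int := if r < (S_i.length : Int) then PySem.List.pyGetD S_i r 0 else 0
    let row : List Int := List.replicate C_out.toNat 0
    if scope ≠ 0 then pvRowB A_i r scope limit colors_order row 0 else row)

-- ===== PRECONDITION & SPEC =====
def Spec_reconstruct_grid_from_planes_py (A_i : List (Int × List Int)) (S_i : List Int) (colors_order : List Int) (R_out : Int) (C_out : Int) (out : List (List Int)) : Prop := out = reconstruct_grid_from_planes_py_alt A_i S_i colors_order R_out C_out
instance (A_i : List (Int × List Int)) (S_i : List Int) (colors_order : List Int) (R_out : Int) (C_out : Int) (out : List (List Int)) : Decidable (Spec_reconstruct_grid_from_planes_py A_i S_i colors_order R_out C_out out) := by unfold Spec_reconstruct_grid_from_planes_py; infer_instance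

-- ===== CLAIM (what is proved, stated in full; the proofs are below) =====
def Claim_equal_reconstruct_grid_from_planes_py : Prop := ∀ (A_i : List (Int × List Int)) (S_i : List Int) (colors_order : List Int) (R_out : Int) (C_out : Int), Dom_reconstruct_grid_from_planes_py A_i S_i colors_order R_out C_out → Spec_reconstruct_grid_from_planes_py A_i S_i colors_order R_out C_out (reconstruct_grid_from_planes_py A_i S_i colors_order R_out C_out)

-- ===== LEMMAS AND PROOFS =====
theorem pvNat_add_or (a b : Nat) (h : a &&& b = 0) : a + b = a ||| b := by
  induction a using Nat.strong_induction_on generalizing b with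
  | _ a ih =>
    rcases Nat.eq_zero_or_pos a with ha | ha
    · simp [ha]
    · have h2 : a / 2 &&& b / 2 = 0 := by rw [← Nat.and_div_two, h]
      have ih2 := ih (a / 2) (Nat.div_lt_self ha (by norm_num)) (b / 2) h2
      have hm : a % 2 &&& b % 2 = 0 := by
        rw [← Nat.and_one_is_mod, ← Nat.and_one_is_mod]
        calc a &&& 1 &&& (b &&& 1) = (a &&& b) &&& (1 &&& 1) := by ac_rfl
        _ = 0 := by rw [h]; rfl
      have hor : a ||| b = 2 * (a / 2 ||| b / 2) + (a % 2 ||| b % 2) := by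
        have hd : (a ||| b) / 2 = a / 2 ||| b / 2 := Nat.or_div_two
        have hm2 : (a ||| b) % 2 = a % 2 ||| b % 2 := by
          rw [← Nat.and_one_is_mod, ← Nat.and_one_is_mod, ← Nat.and_one_is_mod,
            Nat.and_or_distrib_right]
        omega
      have ha2 := Nat.mod_two_eq_zero_or_one a
      have hb2 := Nat.mod_two_eq_zero_or_one b
      have hsum : a % 2 + b % 2 = a % 2 ||| b % 2 := by
        rcases ha2 with h1 | h1 <;> rcases hb2 with h2' | h2' <;>
          rw [h1, h2'] at hm ⊢ <;> first | rfl | (exfalso; exact absurd hm (by decide))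
      omega

theorem pvNat_sub_and (m n : Nat) : m - (m &&& n) = Nat.ldiff m n := by
  have hdisj : Nat.ldiff m n &&& (m &&& n) = 0 := by
    apply Nat.eq_of_testBit_eq
    intro k
    simp only [Nat.testBit_and, Nat.testBit_ldiff, Nat.zero_testBit]
    cases m.testBit k <;> cases n.testBit k <;> rfl
  have hor : Nat.ldiff m n ||| (m &&& n) = m := by
    apply Nat.eq_of_testBit_eq
    intro k
    simp only [Nat.testBit_or, Nat.testBit_and, Nat.testBit_ldiff]
    cases m.testBit k <;> cases n.testBit k <;> rfl
  have := pvNat_add_or _ _ hdisj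
  omega


theorem pvOfNat_nonneg (m : Nat) : (0:Int) ≤ Int.ofNat m := Int.natCast_nonneg m
theorem pvNegSucc_not_nonneg (m : Nat) : ¬ (0:Int) ≤ Int.negSucc m :=
  Int.not_le.mpr (Int.negSucc_lt_zero m)
theorem pvToNat_ofNat (m : Nat) : (Int.ofNat m).toNat = m := rfl
theorem pvToNat_neg_negSucc (m : Nat) : (-Int.negSucc m - 1).toNat = m := by
  rw [Int.negSucc_eq]; simp

theorem pvBand_eq_land (a b : Int) : PySem.Int.band a b = Int.land a b := by
  rcases a with m | m <;> rcases b with n | n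
  · simp only [PySem.Int.band, Int.land, if_pos (pvOfNat_nonneg _), pvToNat_ofNat]
  · simp only [PySem.Int.band, Int.land, if_pos (pvOfNat_nonneg _),
      if_neg (pvNegSucc_not_nonneg _), pvToNat_ofNat, pvToNat_neg_negSucc]
    rw [pvNat_sub_and]
  · simp only [PySem.Int.band, Int.land, if_pos (pvOfNat_nonneg _),
      if_neg (pvNegSucc_not_nonneg _), pvToNat_ofNat, pvToNat_neg_negSucc]
    rw [pvNat_sub_and]
  · simp only [PySem.Int.band, Int.land, if_neg (pvNegSucc_not_nonneg _), pvToNat_neg_negSucc]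
    rw [Int.negSucc_eq]; ring

theorem pvBor_eq_lor (a b : Int) : PySem.Int.bor a b = Int.lor a b := by
  rcases a with m | m <;> rcases b with n | n
  · simp only [PySem.Int.bor, Int.lor, if_pos (pvOfNat_nonneg _), pvToNat_ofNat]
  · simp only [PySem.Int.bor, Int.lor, if_pos (pvOfNat_nonneg _),
      if_neg (pvNegSucc_not_nonneg _), pvToNat_ofNat, pvToNat_neg_negSucc]
    rw [pvNat_sub_and, Int.negSucc_eq]; ring
  · simp only [PySem.Int.bor, Int.lor, if_pos (pvOfNat_nonneg _),
      if_neg (pvNegSucc_not_nonneg _), pvToNat_ofNat, pvToNat_neg_negSucc]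
    rw [pvNat_sub_and, Int.negSucc_eq]; ring
  · simp only [PySem.Int.bor, Int.lor, if_neg (pvNegSucc_not_nonneg _), pvToNat_neg_negSucc]
    rw [Int.negSucc_eq]; ring

theorem pvNot_eq_lnot (a : Int) : Int.not a = Int.lnot a := by cases a <;> rfl

theorem pvTb_band (a b : Int) (k : Nat) :
    (PySem.Int.band a b).testBit k = (a.testBit k && b.testBit k) := by
  rw [pvBand_eq_land]; exact Int.testBit_land a b k
theorem pvTb_bor (a b : Int) (k : Nat) :
    (PySem.Int.bor a b).testBit k = (a.testBit k || b.testBit k) := by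
  rw [pvBor_eq_lor]; exact Int.testBit_lor a b k
theorem pvTb_not (a : Int) (k : Nat) : (Int.not a).testBit k = !a.testBit k := by
  rw [pvNot_eq_lnot]; exact Int.testBit_lnot a k
theorem pvTb_zero (k : Nat) : (0 : Int).testBit k = false := by
  show (Int.ofNat 0).testBit k = false
  simp [Int.testBit]
theorem pvShift_one (c : Nat) : ((1:Int) <<< c) = Int.ofNat (2^c) := by
  rw [Int.shiftLeft_eq]; simp

theorem pvBand_mask_ne_zero (x : Int) (c : Nat) :
    (PySem.Int.band x ((1:Int) <<< c) ≠ 0) ↔ x.testBit c = true := by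
  rw [pvBand_eq_land, pvShift_one]
  rcases x with m | m
  · show (Int.ofNat (m &&& 2^c) ≠ 0) ↔ Nat.testBit m c = true
    rw [Nat.and_two_pow]
    constructor
    · intro h
      by_contra hb
      simp [Bool.not_eq_true] at hb
      simp [hb] at h
    · intro h
      simp [h]
  · show (Int.ofNat (Nat.ldiff (2^c) m) ≠ 0) ↔ (!m.testBit c) = true
    constructor
    · intro h
      by_contra hb
      simp at hb
      apply h
      have : Nat.ldiff (2^c) m = 0 := by
        apply Nat.eq_of_testBit_eq
        intro j
        simp only [Nat.testBit_ldiff, Nat.zero_testBit, Nat.testBit_two_pow]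
        by_cases hj : c = j
        · subst hj; simp [hb]
        · simp [hj]
      rw [this]
      rfl
    · intro h
      have : (Nat.ldiff (2^c) m).testBit c = true := by
        simp only [Nat.testBit_ldiff, Nat.testBit_two_pow]
        simp [h]
      intro h0
      have h0' : Nat.ldiff (2^c) m = 0 := by exact Int.ofNat_inj.mp h0
      rw [h0', Nat.zero_testBit] at this
      exact Bool.false_ne_true this

theorem pvLowbit (n : Nat) (hn : 0 < n) :
    ∃ t, n - (n &&& (n-1)) = 2^t ∧
      (∀ k, (n &&& (n-1)).testBit k = (n.testBit k && !decide (k = t))) ∧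
      n.testBit t = true := by
  induction n using Nat.strong_induction_on with
  | _ n ih =>
    rcases Nat.even_or_odd n with he | ho
    · -- even: n = 2*h
      obtain ⟨h, hh⟩ := he
      have hh2 : n = 2 * h := by omega
      have hhpos : 0 < h := by omega
      obtain ⟨t', ht1, ht2, ht3⟩ := ih h (by omega) hhpos
      have hand : n &&& (n - 1) = 2 * (h &&& (h - 1)) := by
        apply Nat.eq_of_testBit_eq
        intro k
        cases k with
        | zero =>
          simp only [Nat.testBit_zero]
          have : n % 2 = 0 := by omega
          have h2 : (2 * (h &&& (h-1))) % 2 = 0 := by omega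
          simp [this, h2]
        | succ k =>
          simp only [Nat.testBit_succ]
          have e1 : n / 2 = h := by omega
          have e2 : (n - 1) / 2 = h - 1 := by omega
          have e3 : (2 * (h &&& (h-1))) / 2 = h &&& (h - 1) := by omega
          rw [Nat.and_div_two, e1, e2, e3]
      refine ⟨t' + 1, ?_, ?_, ?_⟩
      · have hle : h &&& (h - 1) ≤ h := Nat.le_of_lt_succ (Nat.lt_succ_of_le Nat.and_le_left)
        rw [hand]
        have : 2 * h - 2 * (h &&& (h-1)) = 2 * (h - (h &&& (h-1))) := by omega
        rw [hh2, this, ht1]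
        ring
      · intro k
        rw [hand]
        cases k with
        | zero =>
          simp only [Nat.testBit_zero]
          have h1 : (2 * (h &&& (h-1))) % 2 = 0 := by omega
          have h2 : n % 2 = 0 := by omega
          simp [h1, h2]
        | succ k =>
          simp only [Nat.testBit_succ]
          have e3 : (2 * (h &&& (h-1))) / 2 = h &&& (h - 1) := by omega
          have e1 : n / 2 = h := by omega
          rw [e3, e1, ht2 k]
          congr 2
          simp
      · have e1 : n / 2 = h := by omega
        rw [Nat.testBit_succ, e1]; exact ht3
    · -- odd
      have h1 : n % 2 = 1 := Nat.odd_iff.mp ho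
      have hand : n &&& (n - 1) = n - 1 := by
        apply Nat.eq_of_testBit_eq
        intro k
        cases k with
        | zero =>
          simp only [Nat.testBit_zero]
          have h2 : (n - 1) % 2 = 0 := by omega
          simp [h2]
        | succ k =>
          simp only [Nat.testBit_succ]
          have e2 : (n - 1) / 2 = n / 2 := by omega
          rw [Nat.and_div_two, e2, Nat.and_self]
      refine ⟨0, by omega, ?_, by simp [Nat.testBit_zero, h1]⟩
      intro k
      rw [hand]
      cases k with
      | zero =>
        simp only [Nat.testBit_zero]
        have h2 : (n - 1) % 2 = 0 := by omega
        simp [h2]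
      | succ k =>
        simp only [Nat.testBit_succ]
        have e2 : (n - 1) / 2 = n / 2 := by omega
        rw [e2]
        simp

theorem pvBitLength_two_pow (t : Nat) : PySem.Int.bitLength ((2^t : Nat) : Int) = t + 1 := by
  have h0 : ((2^t : Nat) : Int) ≠ 0 := by positivity
  have h1 := PySem.Int.lt_two_pow_bitLength ((2^t : Nat) : Int)
  have h2 := PySem.Int.two_pow_bitLength_le ((2^t : Nat) : Int) h0
  rw [Int.natAbs_natCast] at h1 h2
  set bl := PySem.Int.bitLength ((2^t : Nat) : Int) with hbl
  have hblpos : 0 < bl := by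
    by_contra hc
    have : bl = 0 := by omega
    rw [this] at h1
    have : 0 < 2^t := Nat.two_pow_pos t
    simp at h1
  have ht1 : t < bl := (Nat.pow_lt_pow_iff_right (by norm_num)).mp h1
  have ht2 : bl - 1 ≤ t := (Nat.pow_le_pow_iff_right (by norm_num)).mp h2
  omega

-- band bounds / sign
theorem pvBand_le_right (a b : Int) (hb : 0 ≤ b) : PySem.Int.band a b ≤ b := by
  rcases a with m | m <;> rcases b with n | n
  · simp only [PySem.Int.band, if_pos (pvOfNat_nonneg _), pvToNat_ofNat]
    exact Int.ofNat_le.mpr Nat.and_le_right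
  · exact absurd hb (pvNegSucc_not_nonneg n)
  · simp only [PySem.Int.band, if_pos (pvOfNat_nonneg _), if_neg (pvNegSucc_not_nonneg _),
      pvToNat_ofNat, pvToNat_neg_negSucc]
    exact Int.ofNat_le.mpr (Nat.sub_le _ _)
  · exact absurd hb (pvNegSucc_not_nonneg n)

theorem pvBand_nonneg_right (a b : Int) (hb : 0 ≤ b) : 0 ≤ PySem.Int.band a b := by
  rw [PySem.Int.band_comm]
  exact PySem.Int.band_nonneg_of_nonneg_left a hb

theorem pvTb_of_nonneg (m : Int) (hm : 0 ≤ m) (k : Nat) : m.testBit k = m.toNat.testBit k := by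
  rcases m with n | n
  · rfl
  · exact absurd hm (pvNegSucc_not_nonneg n)

theorem pvBand_neg_self (m : Int) (hm : 0 < m) :
    PySem.Int.band m (-m) = ((m.toNat - (m.toNat &&& (m.toNat - 1)) : Nat) : Int) := by
  rcases m with n | n
  · rcases n with _ | k
    · exact absurd hm (by norm_num)
    · have hneg : -(Int.ofNat (k+1)) = Int.negSucc k := rfl
      rw [hneg]
      simp only [PySem.Int.band, if_pos (pvOfNat_nonneg _), if_neg (pvNegSucc_not_nonneg _),
        pvToNat_ofNat, pvToNat_neg_negSucc]
      norm_num
  · exact absurd hm (by exact lt_asymm (Int.negSucc_lt_zero n))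

theorem pvLowBitIdx_spec (m : Int) (hm : 0 < m) :
    ∃ t, pvLowBitIdx m = t ∧
      m.toNat - (m.toNat &&& (m.toNat - 1)) = 2^t ∧
      (∀ k, (m.toNat &&& (m.toNat - 1)).testBit k = (m.toNat.testBit k && !decide (k = t))) ∧
      m.toNat.testBit t = true := by
  have hn : 0 < m.toNat := by omega
  obtain ⟨t, ht1, ht2, ht3⟩ := pvLowbit m.toNat hn
  refine ⟨t, ?_, ht1, ht2, ht3⟩
  unfold pvLowBitIdx
  rw [pvBand_neg_self m hm, ht1, pvBitLength_two_pow]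
  simp

theorem pvSetBits_length (row : List Int) (color m : Int) :
    (pvSetBits row color m).length = row.length := by
  generalize hN : m.toNat = N
  induction N using Nat.strong_induction_on generalizing row m with
  | _ N ih =>
    rw [pvSetBits]
    split_ifs with h
    · have hdec : (PySem.Int.band m (m - 1)).toNat < N := by
        rw [PySem.Int.band_of_nonneg (by omega) (by omega)]
        have h1 : m.toNat &&& (m - 1).toNat ≤ (m - 1).toNat := Nat.and_le_right
        omega
      rw [ih _ hdec _ _ rfl, List.length_set]
    · rfl

theorem pvSetBits_getD (row : List Int) (color m : Int) (hm : 0 ≤ m)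
    (hlt : m.toNat < 2 ^ row.length) (k : Nat) (hk : k < row.length) :
    (pvSetBits row color m).getD k 0 = if m.testBit k then color else row.getD k 0 := by
  generalize hN : m.toNat = N
  induction N using Nat.strong_induction_on generalizing row m with
  | _ N ih =>
    by_cases h : 0 < m
    · rw [pvSetBits, dif_pos h]
      obtain ⟨t, hidx, ht2, ht3, ht4⟩ := pvLowBitIdx_spec m h
      have hsub : (m - 1).toNat = m.toNat - 1 := by omega
      have hband : PySem.Int.band m (m - 1) = ((m.toNat &&& (m.toNat - 1) : Nat) : Int) := by
        rw [PySem.Int.band_of_nonneg (by omega) (by omega), hsub]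
      have hand_le : m.toNat &&& (m.toNat - 1) ≤ m.toNat - 1 := Nat.and_le_right
      have hlow_le : 2 ^ t ≤ m.toNat := by omega
      have htlt : t < row.length := by
        have h2 : (2:Nat) ^ t < 2 ^ row.length := by omega
        exact (Nat.pow_lt_pow_iff_right (by norm_num)).mp h2
      have hlen : (row.set (pvLowBitIdx m) color).length = row.length := List.length_set ..
      have hdec : (PySem.Int.band m (m - 1)).toNat < N := by
        rw [hband, Int.toNat_natCast]; omega
      have ihk := ih _ hdec (row.set (pvLowBitIdx m) color) _ (by rw [hband]; positivity)
        (by rw [hband, hlen, Int.toNat_natCast]; omega) (by rw [hlen]; exact hk) rfl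
      rw [ihk, hband]
      have htb : ((((m.toNat &&& (m.toNat - 1) : Nat)) : Int)).testBit k
          = (m.testBit k && !decide (k = t)) := by
        rw [pvTb_of_nonneg _ (by positivity), Int.toNat_natCast, ht3 k,
          pvTb_of_nonneg m (by omega)]
      rw [htb, hidx]
      have hset : (row.set t color).getD k 0
          = if t = k then color else row.getD k 0 := by
        rw [List.getD_eq_getElem?_getD, List.getD_eq_getElem?_getD, List.getElem?_set,
          if_pos htlt]
        by_cases hkt : t = k
        · simp [hkt]
        · simp [hkt]
      by_cases hkt : k = t
      · subst hkt
        have hmt : m.testBit k = true := by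
          rw [pvTb_of_nonneg m (by omega)]; exact ht4
        rw [hmt, hset]
        simp
      · rw [hset, if_neg (Ne.symm hkt)]
        simp [hkt]
    · have hm0 : m = 0 := by omega
      subst hm0
      rw [pvSetBits, dif_neg h, pvTb_zero]
      simp

theorem findA_none (A_i : List (Int × List Int)) (r bit color : Int) (rest : List Int)
    (hlook : (A_i.find? (fun p => p.1 == color)).map Prod.snd = none) :
    pvFindColorA A_i r bit (color :: rest) = pvFindColorA A_i r bit rest := by
  rw [pvFindColorA, hlook]

theorem findA_emp (A_i : List (Int × List Int)) (r bit color : Int) (rest : List Int)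
    (plane : List Int) (hlook : (A_i.find? (fun p => p.1 == color)).map Prod.snd = some plane)
    (hemp : plane = []) :
    pvFindColorA A_i r bit (color :: rest) = pvFindColorA A_i r bit rest := by
  rw [pvFindColorA, hlook]
  simp [hemp]

theorem findA_go (A_i : List (Int × List Int)) (r bit color : Int) (rest : List Int)
    (plane : List Int) (hlook : (A_i.find? (fun p => p.1 == color)).map Prod.snd = some plane)
    (hemp : plane ≠ []) :
    pvFindColorA A_i r bit (color :: rest) =
      (if PySem.Int.band (if r < (plane.length : Int) then PySem.List.pyGetD plane r 0 else 0) bit ≠ 0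
       then some color else pvFindColorA A_i r bit rest) := by
  rw [pvFindColorA, hlook]
  simp only [if_neg hemp]

theorem rowB_none (A_i : List (Int × List Int)) (r scope limit color : Int) (rest : List Int)
    (row : List Int) (assigned : Int)
    (hlook : (A_i.find? (fun p => p.1 == color)).map Prod.snd = none) :
    pvRowB A_i r scope limit (color :: rest) row assigned
      = pvRowB A_i r scope limit rest row assigned := by
  rw [pvRowB, hlook]

theorem rowB_emp (A_i : List (Int × List Int)) (r scope limit color : Int) (rest : List Int)
    (row : List Int) (assigned : Int) (plane : List Int)
    (hlook : (A_i.find? (fun p => p.1 == color)).map Prod.snd = some plane) (hemp : plane = []) :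
    pvRowB A_i r scope limit (color :: rest) row assigned
      = pvRowB A_i r scope limit rest row assigned := by
  rw [pvRowB, hlook]
  simp [hemp]

theorem rowB_go (A_i : List (Int × List Int)) (r scope limit color : Int) (rest : List Int)
    (row : List Int) (assigned : Int) (plane : List Int)
    (hlook : (A_i.find? (fun p => p.1 == color)).map Prod.snd = some plane) (hemp : plane ≠ []) :
    pvRowB A_i r scope limit (color :: rest) row assigned
      = (if PySem.Int.band (PySem.Int.band (if r < (plane.length : Int) then PySem.List.pyGetD plane r 0 else 0) scope) (Int.not assigned) ≠ 0
         then pvRowB A_i r scope limit rest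
           (pvSetBits row color (PySem.Int.band (PySem.Int.band (PySem.Int.band (if r < (plane.length : Int) then PySem.List.pyGetD plane r 0 else 0) scope) (Int.not assigned)) limit))
           (PySem.Int.bor assigned (PySem.Int.band (PySem.Int.band (if r < (plane.length : Int) then PySem.List.pyGetD plane r 0 else 0) scope) (Int.not assigned)))
         else pvRowB A_i r scope limit rest row assigned) := by
  rw [pvRowB, hlook]
  simp only [if_neg hemp]

theorem pvRowB_length (A_i : List (Int × List Int)) (r scope limit : Int)
    (cs : List Int) (row : List Int) (assigned : Int) :
    (pvRowB A_i r scope limit cs row assigned).length = row.length := by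
  induction cs generalizing row assigned with
  | nil => rfl
  | cons color rest ih =>
    rcases hlook : (A_i.find? (fun p => p.1 == color)).map Prod.snd with _ | plane
    · rw [rowB_none _ _ _ _ _ _ _ _ hlook]; exact ih row assigned
    · by_cases hemp : plane = []
      · rw [rowB_emp _ _ _ _ _ _ _ _ _ hlook hemp]; exact ih row assigned
      · rw [rowB_go _ _ _ _ _ _ _ _ _ hlook hemp]
        split_ifs <;> (rw [ih]; try rw [pvSetBits_length])

theorem pvRowB_getD (A_i : List (Int × List Int)) (r scope limit : Int)
    (cs : List Int) (row : List Int) (assigned : Int)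
    (hlimnn : 0 ≤ limit) (hlimlt : limit.toNat < 2 ^ row.length)
    (hlimbit : ∀ j, j < row.length → limit.testBit j = true)
    (k : Nat) (hk : k < row.length) :
    (pvRowB A_i r scope limit cs row assigned).getD k 0 =
      if assigned.testBit k = false ∧ scope.testBit k = true then
        (match pvFindColorA A_i r ((1:Int) <<< k) cs with
         | some u => u
         | none => row.getD k 0)
      else row.getD k 0 := by
  induction cs generalizing row assigned with
  | nil =>
    rw [pvRowB, pvFindColorA]
    split_ifs <;> rfl
  | cons color rest ih =>
    rcases hlook : (A_i.find? (fun p => p.1 == color)).map Prod.snd with _ | plane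
    · rw [rowB_none _ _ _ _ _ _ _ _ hlook, findA_none _ _ _ _ _ hlook]
      exact ih row assigned hlimlt hlimbit hk
    · by_cases hemp : plane = []
      · rw [rowB_emp _ _ _ _ _ _ _ _ _ hlook hemp, findA_emp _ _ _ _ _ _ hlook hemp]
        exact ih row assigned hlimlt hlimbit hk
      · rw [rowB_go _ _ _ _ _ _ _ _ _ hlook hemp, findA_go _ _ _ _ _ _ hlook hemp]
        set rm : Int := (if r < (plane.length : Int) then PySem.List.pyGetD plane r 0 else 0) with hrm
        set new : Int := PySem.Int.band (PySem.Int.band rm scope) (Int.not assigned) with hnewdef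
        have htbnew : ∀ j, new.testBit j = (rm.testBit j && scope.testBit j && !assigned.testBit j) := by
          intro j
          rw [hnewdef, pvTb_band, pvTb_band, pvTb_not]
        have hmask : (PySem.Int.band rm ((1:Int) <<< k) ≠ 0) ↔ rm.testBit k = true :=
          pvBand_mask_ne_zero rm k
        by_cases hnew : new ≠ 0
        · rw [if_pos hnew]
          have hbl : (PySem.Int.band new limit).toNat < 2 ^ row.length := by
            have h1 : PySem.Int.band new limit ≤ limit := pvBand_le_right new limit hlimnn
            have h2 : 0 ≤ PySem.Int.band new limit := pvBand_nonneg_right new limit hlimnn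
            omega
          have hlen' : (pvSetBits row color (PySem.Int.band new limit)).length = row.length :=
            pvSetBits_length ..
          have hrow' : (pvSetBits row color (PySem.Int.band new limit)).getD k 0
                = if new.testBit k then color else row.getD k 0 := by
            rw [pvSetBits_getD row color _ (pvBand_nonneg_right new limit hlimnn) hbl k hk,
              pvTb_band, hlimbit k hk, Bool.and_true]
          have ihres := ih (pvSetBits row color (PySem.Int.band new limit))
            (PySem.Int.bor assigned new)
            (by rw [hlen']; exact hlimlt) (by rw [hlen']; exact hlimbit) (by rw [hlen']; exact hk)
          rw [ihres, hrow']
          have hasg' : (PySem.Int.bor assigned new).testBit k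
              = (assigned.testBit k || new.testBit k) := pvTb_bor ..
          by_cases ha : assigned.testBit k = true
          · have htn : new.testBit k = false := by rw [htbnew k, ha]; simp
            simp [hasg', ha, htn]
          · have ha' : assigned.testBit k = false := by simp at ha; exact ha
            by_cases hs : scope.testBit k = true
            · by_cases hr : rm.testBit k = true
              · have htn : new.testBit k = true := by rw [htbnew k, ha', hs, hr]; rfl
                have hb : PySem.Int.band rm ((1:Int) <<< k) ≠ 0 := hmask.mpr hr
                simp [hasg', ha', hs, htn, hb]
              · have hr' : rm.testBit k = false := by simp at hr; exact hr
                have htn : new.testBit k = false := by rw [htbnew k, hr']; rfl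
                have hb : ¬ (PySem.Int.band rm ((1:Int) <<< k) ≠ 0) := fun hc => hr (hmask.mp hc)
                rcases hfind : pvFindColorA A_i r ((1:Int) <<< k) rest with _ | u <;>
                  simp [hasg', ha', hs, htn, hb]
            · have hs' : scope.testBit k = false := by simp at hs; exact hs
              have htn : new.testBit k = false := by rw [htbnew k, hs']; simp
              simp [hasg', hs', htn]
        · rw [if_neg hnew]
          have hnew0 : new = 0 := by by_contra hc; exact hnew hc
          rw [ih row assigned hlimlt hlimbit hk]
          by_cases ha : assigned.testBit k = false
          · by_cases hs : scope.testBit k = true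
            · have hr' : rm.testBit k = false := by
                have h0 : new.testBit k = false := by rw [hnew0]; exact pvTb_zero k
                rw [htbnew k, ha, hs] at h0
                simpa using h0
              have hb : ¬ (PySem.Int.band rm ((1:Int) <<< k) ≠ 0) := fun hc => by
                rw [hmask.mp hc] at hr'; simp at hr'
              simp [hb]
            · simp [hs]
          · simp [ha]

theorem pvShift_one' (c : Nat) : ((1:Int) <<< c) = ((2^c : Nat) : Int) := by
  rw [pvShift_one]; rfl

theorem pvBand_pow_ne_zero (x : Int) (c : Nat) :
    (PySem.Int.band x ((2^c : Nat) : Int) ≠ 0) ↔ x.testBit c = true := by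
  rw [← pvShift_one']
  exact pvBand_mask_ne_zero x c

theorem pvRow_eq (A_i : List (Int × List Int)) (colors_order : List Int) (C_out : Int)
    (r scope : Int) :
    (PySem.List.pyRange 0 C_out 1).map (fun c =>
        if PySem.Int.band scope ((1:Int) <<< c.toNat) = 0 then (0:Int)
        else
          match pvFindColorA A_i r ((1:Int) <<< c.toNat) colors_order with
          | some u => u
          | none => 0) =
      pvRowB A_i r scope (if 0 < C_out then ((1:Int) <<< C_out.toNat) - 1 else 0) colors_order
        (List.replicate C_out.toNat 0) 0 := by
  simp only [Int.shiftLeft_natCast_right, pvShift_one']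
  apply List.ext_getElem
  · rw [List.length_map, PySem.List.length_pyRange_one, pvRowB_length, List.length_replicate]
    omega
  · intro i h1 h2
    have hi : i < C_out.toNat := by
      rw [List.length_map, PySem.List.length_pyRange_one] at h1
      omega
    have hC : 0 < C_out := by omega
    rw [List.getElem_map, PySem.List.getElem_pyRange_one]
    have hc0 : ((0:Int) + (i:Int)).toNat = i := by omega
    rw [hc0]
    have hlimit : (if 0 < C_out then ((2 ^ C_out.toNat : Nat) : Int) - 1 else 0)
        = ((2 ^ C_out.toNat - 1 : Nat) : Int) := by
      rw [if_pos hC]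
      have : (1:Nat) ≤ 2 ^ C_out.toNat := Nat.one_le_two_pow
      push_cast [this]
      ring
    rw [← List.getD_eq_getElem _ 0 h2]
    rw [hlimit]
    rw [pvRowB_getD A_i r scope _ colors_order (List.replicate C_out.toNat 0) 0
      (by positivity)
      (by rw [Int.toNat_natCast, List.length_replicate]
          have : (1:Nat) ≤ 2 ^ C_out.toNat := Nat.one_le_two_pow
          omega)
      (by intro j hj
          rw [List.length_replicate] at hj
          rw [pvTb_of_nonneg _ (by positivity), Int.toNat_natCast,
            Nat.testBit_two_pow_sub_one]
          simp [hj])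
      i (by rw [List.length_replicate]; exact hi)]
    simp only [pvShift_one']
    rw [pvTb_zero, List.getD_replicate _ hi]
    have hmask := pvBand_pow_ne_zero scope i
    by_cases hsb : scope.testBit i = true
    · rw [if_neg (show ¬ (PySem.Int.band scope ((2^i : Nat) : Int) = 0) from
        fun hc => (hmask.mpr hsb) hc)]
      rw [if_pos (And.intro rfl hsb)]
    · have hsb' : scope.testBit i = false := by simp at hsb; exact hsb
      rw [if_pos (show PySem.Int.band scope ((2^i : Nat) : Int) = 0 from
        by by_contra hc; exact hsb (hmask.mp hc))]
      rw [if_neg (show ¬ ((false:Bool) = false ∧ scope.testBit i = true) from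
        fun hc => by have h2b := hc.2; rw [hsb'] at h2b; exact Bool.false_ne_true h2b)]

-- ===== VERDICT (by name: the statement is the Claim_ definition above) =====
theorem reconstruct_grid_from_planes_py_spec : Claim_equal_reconstruct_grid_from_planes_py := by
  intro A_i S_i colors_order R_out C_out _
  unfold Spec_reconstruct_grid_from_planes_py
  unfold reconstruct_grid_from_planes_py reconstruct_grid_from_planes_py_alt
  apply List.map_congr_left
  intro r _
  by_cases hscope : (if r < (S_i.length : Int) then PySem.List.pyGetD S_i r 0 else 0) = 0
  · rw [if_pos hscope, if_neg (fun hc => hc hscope)]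
  · rw [if_neg hscope, if_pos hscope]
    have hre := pvRow_eq A_i colors_order C_out r
      (if r < (S_i.length : Int) then PySem.List.pyGetD S_i r 0 else 0)
    simp only [Int.shiftLeft_natCast_right, pvShift_one'] at hre ⊢
    exact hre
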